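-- pv_equiv track=rewrite | github.com/yalatif0210/ldc_prod | pilot_bot/formatters/telegram_formatter.py | fmt_inactive_accounts
-- ===== SOURCE A (Python) =====
-- def _sep(char: str = "━", length: int = 32) -> str:
--     return char * length
--
-- def _paginate(items: list, chunk: int) -> list[list]:
--     """Découpe une liste en sous-listes de taille 'chunk'."""
--     return [items[i : i + chunk] for i in range(0, len(items), chunk)]
--
-- def fmt_header(title: str, icon: str = "") -> str:
--     """Titre en gras avec séparateur ━."""
--     prefix = f"{icon} " if icon else ""
--     return f"<b>{prefix}{title}</b>\n{_sep()}\n"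
--
-- def fmt_inactive_accounts(rows: list) -> list[str]:
--     """
--     rows = [{'user_name': str, 'username': str, 'role': str}]
--     Liste paginée par 20.
--     """
--     header = fmt_header("Comptes inactifs", "🔒")
--
--     if not rows:
--         return [header + "\n✅ <b>Aucun compte inactif.</b>"]
--
--     pages = _paginate(rows, 20)
--     total = len(rows)
--     messages = []
--
--     for page_idx, page in enumerate(pages, start=1):
--         page_header = header
--         if len(pages) > 1:
--             page_header += f"<i>Page {page_idx}/{len(pages)} — {total} compte(s)</i>\n\n"
--         else:
--             page_header += f"<i>{total} compte(s) inactif(s)</i>\n\n"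
--
--         items = []
--         start_num = (page_idx - 1) * 20 + 1
--         for i, row in enumerate(page, start=start_num):
--             user_name = row.get("user_name", "—")
--             username = row.get("username", "—")
--             role = row.get("role", "—")
--             items.append(
--                 f"{i}. <b>{user_name}</b> (<code>@{username}</code>)\n"
--                 f"   🏷️ {role}"
--             )
--
--         messages.append(page_header + "\n".join(items))
--
--     return messages
-- ===== SOURCE B (Python) =====
-- def _sep(char: str = "━", length: int = 32) -> str:
--     return char * length
--
-- def fmt_header(title: str, icon: str = "") -> str:
--     """Titre en gras avec séparateur ━."""
--     prefix = f"{icon} " if icon else ""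
--     return f"<b>{prefix}{title}</b>\n{_sep()}\n"
--
-- def fmt_inactive_accounts(rows: list) -> list[str]:
--     """Flat numbering pass first, then paginate the formatted strings."""
--     header = fmt_header("Comptes inactifs", "🔒")
--
--     if not rows:
--         return [header + "\n✅ <b>Aucun compte inactif.</b>"]
--
--     total = len(rows)
--     lines = [
--         f"{i}. <b>{row.get('user_name', '—')}</b> (<code>@{row.get('username', '—')}</code>)\n"
--         f"   🏷️ {row.get('role', '—')}"
--         for i, row in enumerate(rows, start=1)
--     ]
--     n_pages = (total + 19) // 20
--
--     messages = []
--     for p in range(n_pages):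
--         if n_pages > 1:
--             page_header = header + f"<i>Page {p + 1}/{n_pages} — {total} compte(s)</i>\n\n"
--         else:
--             page_header = header + f"<i>{total} compte(s) inactif(s)</i>\n\n"
--         messages.append(page_header + "\n".join(lines[p * 20 : (p + 1) * 20]))
--
--     return messages
-- ===== Notes on version B (the rewrite author's own statement) =====
-- stated objective: alternative
-- what changed: B formats every row once into a flat globally-numbered list of strings and then paginates those strings by computed page count, instead of A's paginate-rows-first then per-page enumerate-and-format.
import Mathlib
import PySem

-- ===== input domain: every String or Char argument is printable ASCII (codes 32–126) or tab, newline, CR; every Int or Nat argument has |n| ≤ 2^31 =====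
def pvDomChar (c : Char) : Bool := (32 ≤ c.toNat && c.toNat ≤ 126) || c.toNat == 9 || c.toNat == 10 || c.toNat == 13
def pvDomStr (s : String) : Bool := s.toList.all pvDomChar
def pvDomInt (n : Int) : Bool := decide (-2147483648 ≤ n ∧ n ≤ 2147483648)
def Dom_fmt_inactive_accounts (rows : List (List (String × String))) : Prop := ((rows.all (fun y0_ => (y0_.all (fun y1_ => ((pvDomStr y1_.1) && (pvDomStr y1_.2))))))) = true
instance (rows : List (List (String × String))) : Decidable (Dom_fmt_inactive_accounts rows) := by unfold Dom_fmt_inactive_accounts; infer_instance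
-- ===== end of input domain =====

-- B builds one flat globally-numbered list of formatted row strings, then paginates those strings; same result as A's paginate-rows-then-format, proved equal on the domain.


-- ===== PORT A =====
-- _sep: char * length (exact for the nonnegative length 32 used here)
def pvSep (char : String) (length : Int) : String :=
  String.ofList (PySem.List.pyRepeat char.toList length)

-- fmt_header (shared module-level helper of both Pythons, byte-identical there)
def pvFmtHeader (title : String) (icon : String) : String :=
  let pfx := if icon = "" then "" else icon ++ " "
  "<b>" ++ pfx ++ title ++ "</b>\n" ++ pvSep "━" 32 ++ "\n"

-- the row f-string template (identical literal template in A and in B)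
def pvRowFmt (i : Int) (row : List (String × String)) : String :=
  PySem.Int.toStr i ++ ". <b>" ++ (PySem.Dict.mk row).getD "user_name" "—" ++
  "</b> (<code>@" ++ (PySem.Dict.mk row).getD "username" "—" ++ "</code>)\n   🏷️ " ++
  (PySem.Dict.mk row).getD "role" "—"

-- _paginate
def pvPaginate {α : Type} (items : List α) (chunk : Int) : List (List α) :=
  (PySem.List.pyRange 0 items.length chunk).map
    (fun i => PySem.List.slice items (some i) (some (i + chunk)))

def fmt_inactive_accounts (rows : List (List (String × String))) : List String :=
  let header := pvFmtHeader "Comptes inactifs" "🔒"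
  if rows = [] then [header ++ "\n✅ <b>Aucun compte inactif.</b>"]
  else
    let pages := pvPaginate rows 20
    let total : Int := rows.length
    (PySem.List.enumerate pages 1).foldl (fun messages pp =>
      let page_idx := pp.1
      let page := pp.2
      let page_header :=
        if pages.length > 1 then
          header ++ "<i>Page " ++ PySem.Int.toStr page_idx ++ "/" ++
            PySem.Int.toStr (pages.length : Int) ++ " — " ++ PySem.Int.toStr total ++
            " compte(s)</i>\n\n"
        else
          header ++ "<i>" ++ PySem.Int.toStr total ++ " compte(s) inactif(s)</i>\n\n"
      let start_num := (page_idx - 1) * 20 + 1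
      let items := (PySem.List.enumerate page start_num).foldl
        (fun items ir => items ++ [pvRowFmt ir.1 ir.2]) []
      messages ++ [page_header ++ PySem.Str.join "\n" items]) []

-- ===== PORT B =====
def fmt_inactive_accounts_alt (rows : List (List (String × String))) : List String :=
  let header := pvFmtHeader "Comptes inactifs" "🔒"
  if rows = [] then [header ++ "\n✅ <b>Aucun compte inactif.</b>"]
  else
    let total : Int := rows.length
    let lines := (PySem.List.enumerate rows 1).map (fun ir => pvRowFmt ir.1 ir.2)
    let n_pages := PySem.Int.floordiv (total + 19) 20
    (PySem.List.pyRange 0 n_pages 1).foldl (fun messages p =>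
      let page_header :=
        if n_pages > 1 then
          header ++ "<i>Page " ++ PySem.Int.toStr (p + 1) ++ "/" ++
            PySem.Int.toStr n_pages ++ " — " ++ PySem.Int.toStr total ++
            " compte(s)</i>\n\n"
        else
          header ++ "<i>" ++ PySem.Int.toStr total ++ " compte(s) inactif(s)</i>\n\n"
      messages ++ [page_header ++ PySem.Str.join "\n"
        (PySem.List.slice lines (some (p * 20)) (some ((p + 1) * 20)))]) []

-- ===== PRECONDITION & SPEC =====
def Spec_fmt_inactive_accounts (rows : List (List (String × String))) (out : List String) : Prop := out = fmt_inactive_accounts_alt rows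
instance (rows : List (List (String × String))) (out : List String) : Decidable (Spec_fmt_inactive_accounts rows out) := by unfold Spec_fmt_inactive_accounts; infer_instance

-- ===== CLAIM (what is proved, stated in full; the proofs are below) =====
def Claim_equal_fmt_inactive_accounts : Prop := ∀ (rows : List (List (String × String))), Dom_fmt_inactive_accounts rows → Spec_fmt_inactive_accounts rows (fmt_inactive_accounts rows)

-- ===== LEMMAS AND PROOFS =====
theorem pv_enum_take {α : Type} (xs : List α) (s : Int) (n : Nat) :
    (PySem.List.enumerate xs s).take n = PySem.List.enumerate (xs.take n) s := by
  induction xs generalizing s n with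
  | nil => simp [PySem.List.enumerate_nil]
  | cons x t ih =>
    cases n with
    | zero => simp [PySem.List.enumerate_nil]
    | succ m => simp [PySem.List.enumerate_cons, ih]

theorem pv_enum_drop {α : Type} (xs : List α) (s : Int) (m : Nat) :
    (PySem.List.enumerate xs s).drop m = PySem.List.enumerate (xs.drop m) (s + m) := by
  induction xs generalizing s m with
  | nil => simp [PySem.List.enumerate_nil]
  | cons x t ih =>
    cases m with
    | zero => simp
    | succ k =>
      simp only [PySem.List.enumerate_cons, List.drop_succ_cons, ih]
      congr 1
      push_cast
      ring


theorem pv_slice_block {α : Type} (xs : List α) (k : Nat) (a b : Int)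
    (ha : a = 20 * (k : Int)) (hb : b = 20 * (k : Int) + 20) :
    PySem.List.slice xs (some a) (some b) = (xs.drop (20 * k)).take 20 := by
  subst ha hb
  have h := PySem.List.slice_natCast_add xs (20 * k) 20
  push_cast at h
  exact h

theorem pv_chunk (rows : List (List (String × String))) (k : Nat) :
    (PySem.List.enumerate
        (PySem.List.slice rows (some (20 * (k : Int))) (some (20 * (k : Int) + 20)))
        ((1 + (k : Int) - 1) * 20 + 1)).map (fun ir => pvRowFmt ir.1 ir.2)
  = PySem.List.slice ((PySem.List.enumerate rows 1).map (fun ir => pvRowFmt ir.1 ir.2))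
      (some ((k : Int) * 20)) (some (((k : Int) + 1) * 20)) := by
  rw [pv_slice_block rows k _ _ rfl rfl,
      pv_slice_block ((PySem.List.enumerate rows 1).map (fun ir => pvRowFmt ir.1 ir.2)) k _ _
        (by ring) (by ring),
      ← List.map_drop, ← List.map_take, pv_enum_drop, pv_enum_take]
  congr 2
  push_cast
  ring

theorem pv_getElem_pyRange20 (b : Int) (k : Nat)
    (hk : k < (PySem.List.pyRange 0 b 20).length) :
    (PySem.List.pyRange 0 b 20)[k] = 20 * (k : Int) := by
  simp only [PySem.List.pyRange_of_pos 0 b (by norm_num : (0:Int) < 20),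
    List.getElem_map, List.getElem_range, zero_add]

theorem pv_len_pyRange20 (n : Nat) (h : 0 < n) :
    (PySem.List.pyRange 0 (n : Int) 20).length = (((n : Int) + 19) / 20).toNat := by
  rw [PySem.List.pyRange_of_pos 0 _ (by norm_num),
      if_pos (show (0 : Int) < (n : Int) by exact_mod_cast h)]
  simp only [List.length_map, List.length_range]
  omega

-- ===== VERDICT (by name: the statement is the Claim_ definition above) =====
theorem fmt_inactive_accounts_spec : Claim_equal_fmt_inactive_accounts := by
  intro rows _
  unfold Spec_fmt_inactive_accounts
  by_cases h : rows = []
  · simp [fmt_inactive_accounts, fmt_inactive_accounts_alt, h]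
  · have hN : 0 < rows.length := List.length_pos_iff.mpr h
    have hfd : PySem.Int.floordiv ((rows.length : Int) + 19) 20
        = ((rows.length : Int) + 19) / 20 :=
      Int.fdiv_eq_ediv_of_nonneg _ (by positivity)
    have hnp0 : 0 < ((rows.length : Int) + 19) / 20 := by omega
    have hlen := pv_len_pyRange20 rows.length hN
    simp only [fmt_inactive_accounts, fmt_inactive_accounts_alt, pvPaginate, if_neg h, hfd,
      PySem.List.foldl_append_singleton_eq_map, List.nil_append]
    apply List.ext_getElem
    · simp [PySem.List.length_enumerate, PySem.List.length_pyRange_one, hlen]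
    · intro k h1 h2
      have hcast : ((((rows.length : Int) + 19) / 20).toNat : Int)
          = ((rows.length : Int) + 19) / 20 := Int.toNat_of_nonneg hnp0.le
      have hcond : (1 < (((rows.length : Int) + 19) / 20).toNat)
          ↔ (1 < ((rows.length : Int) + 19) / 20) := by omega
      simp only [List.getElem_map, PySem.List.getElem_enumerate,
        PySem.List.getElem_pyRange_one, List.length_map, hlen, zero_add]
      rw [pv_getElem_pyRange20, pv_chunk rows k, hcast,
          show (1 : Int) + (k : Int) = (k : Int) + 1 from by ring]
      by_cases hm : 1 < ((rows.length : Int) + 19) / 20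
      · rw [if_pos (hcond.mpr hm), if_pos hm]
      · rw [if_neg (fun hc => hm (hcond.mp hc)), if_neg hm]
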